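-- pv_equiv track=rewrite | github.com/sarahed123/CloudCenterSimulator | graph_generators/cheegs/graph.py | cdf_dict
-- ===== SOURCE A (Python) =====
-- def cdf_dict(data):
-- 	ret = {}
-- 	for i,k in enumerate(data.keys()):
-- 		s = 0
-- 		for j,k2 in enumerate(data.keys()):
-- 			if j<=i:
-- 				s+=data[k2]
-- 		ret[k] = s
-- 	return ret
-- ===== SOURCE B (Python) =====
-- def cdf_dict(data):
--     ret = {}
--     s = 0
--     for k, v in data.items():
--         s += v
--         ret[k] = s
--     return ret
-- ===== Notes on version B (the rewrite author's own statement) =====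
-- stated objective: faster
-- what changed: Replaced the quadratic per-key re-summation of all earlier values by a single pass over the items with a running-sum accumulator.
import Mathlib
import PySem

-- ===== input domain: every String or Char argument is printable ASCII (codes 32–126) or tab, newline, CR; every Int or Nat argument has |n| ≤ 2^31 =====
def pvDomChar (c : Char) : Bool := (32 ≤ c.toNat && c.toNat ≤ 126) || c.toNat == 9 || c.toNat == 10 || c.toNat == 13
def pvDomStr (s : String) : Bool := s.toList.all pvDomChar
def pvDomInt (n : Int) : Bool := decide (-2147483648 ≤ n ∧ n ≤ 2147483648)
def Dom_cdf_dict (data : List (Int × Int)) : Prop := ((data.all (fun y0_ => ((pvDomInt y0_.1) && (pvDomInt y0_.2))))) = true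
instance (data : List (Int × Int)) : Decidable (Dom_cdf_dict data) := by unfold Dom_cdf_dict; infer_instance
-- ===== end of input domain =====

-- B replaces A's quadratic per-key re-summation by one pass with a running sum (asymptotically faster).

-- ===== PORT A =====
def cdf_dict (data : List (Int × Int)) : List (Int × Int) :=
  let d : PySem.Dict Int Int := PySem.Dict.mk data
  let ret : PySem.Dict Int Int :=
    (PySem.List.enumerate (PySem.Dict.keys d)).foldl (fun ret ik =>
      let s : Int :=
        (PySem.List.enumerate (PySem.Dict.keys d)).foldl (fun s jk =>
          if jk.1 ≤ ik.1 then s + d.getD jk.2 0 else s) 0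
      ret.insert ik.2 s) PySem.Dict.empty
  ret.items

-- ===== PORT B =====
def cdf_dict_alt (data : List (Int × Int)) : List (Int × Int) :=
  let r := data.foldl (fun (st : PySem.Dict Int Int × Int) kv =>
      let s := st.2 + kv.2
      (st.1.insert kv.1 s, s)) (PySem.Dict.empty, 0)
  r.1.items

-- ===== PRECONDITION & SPEC =====
-- Pre_: the list stands for a Python dict, whose keys are necessarily distinct;
-- every input the Python A can actually receive satisfies it.
def Pre_cdf_dict (data : List (Int × Int)) : Prop := (data.map Prod.fst).Nodup
instance (data : List (Int × Int)) : Decidable (Pre_cdf_dict data) := by unfold Pre_cdf_dict; infer_instance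
def pvWitness_cdf_dict : (List (Int × Int)) := [(3, 5), (1, -2), (7, 4)]

def Spec_cdf_dict (data : List (Int × Int)) (out : List (Int × Int)) : Prop := out = cdf_dict_alt data
instance (data : List (Int × Int)) (out : List (Int × Int)) : Decidable (Spec_cdf_dict data out) := by unfold Spec_cdf_dict; infer_instance

-- ===== CLAIM (what is proved, stated in full; the proofs are below) =====
def Claim_equal_cdf_dict : Prop := ∀ (data : List (Int × Int)), Dom_cdf_dict data → Pre_cdf_dict data → Spec_cdf_dict data (cdf_dict data)

-- ===== LEMMAS AND PROOFS =====

/-- Reference cumulative scan both ports are reduced to. -/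
def cdfScan (s : Int) : List (Int × Int) → List (Int × Int)
  | [] => []
  | (k, v) :: xs => (k, s + v) :: cdfScan (s + v) xs

lemma bFold (xs : List (Int × Int)) : ∀ (r : PySem.Dict Int Int) (s : Int),
    (∀ p ∈ xs, r.contains p.1 = false) → (xs.map Prod.fst).Nodup →
    ((xs.foldl (fun (st : PySem.Dict Int Int × Int) kv =>
        (st.1.insert kv.1 (st.2 + kv.2), st.2 + kv.2)) (r, s)).1).items
      = r.items ++ cdfScan s xs := by
  induction xs with
  | nil => intro r s _ _; simp [cdfScan]
  | cons p xs ih =>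
    intro r s hfresh hnd
    obtain ⟨k, v⟩ := p
    simp only [List.foldl_cons, cdfScan]
    rw [ih]
    · rw [PySem.Dict.items_insert_of_not_contains]
      · simp
      · exact hfresh (k, v) (List.mem_cons_self ..)
    · intro q hq
      rw [PySem.Dict.contains_insert]
      have hq1 : q.1 ≠ k := by
        simp only [List.map_cons, List.nodup_cons] at hnd
        intro h; exact hnd.1 (h ▸ List.mem_map_of_mem hq)
      simp [hq1, hfresh q (List.mem_cons_of_mem _ hq)]
    · simp only [List.map_cons, List.nodup_cons] at hnd; exact hnd.2

lemma fst_ge_of_mem_enumerate {α : Type} {xs : List α} {t : Int} {p : Int × α}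
    (h : p ∈ PySem.List.enumerate xs t) : t ≤ p.1 := by
  rw [PySem.List.mem_enumerate_iff] at h
  obtain ⟨k, hk, rfl⟩ := h
  simp

lemma innerA (d : PySem.Dict Int Int) (i : Int)
    (xs : List (Int × Int)) (hlook : ∀ p ∈ xs, d.getD p.1 0 = p.2) :
    ∀ (t s0 : Int),
    (PySem.List.enumerate (xs.map Prod.fst) t).foldl
        (fun s jk => if jk.1 ≤ i then s + d.getD jk.2 0 else s) s0
      = s0 + ((xs.take ((i - t + 1).toNat)).map Prod.snd).sum := by
  induction xs with
  | nil => intro t s0; simp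
  | cons p xs ih =>
    intro t s0
    obtain ⟨k, v⟩ := p
    simp only [List.map_cons, PySem.List.enumerate_cons, List.foldl_cons]
    rw [ih (fun q hq => hlook q (List.mem_cons_of_mem _ hq))]
    have hk : d.getD k 0 = v := hlook (k, v) (List.mem_cons_self ..)
    by_cases ht : t ≤ i
    · have h1 : (i - t + 1).toNat = (i - (t + 1) + 1).toNat + 1 := by omega
      simp [ht, h1, hk, add_assoc]
    · have h1 : (i - t + 1).toNat = 0 := by omega
      have h2 : (i - (t + 1) + 1).toNat = 0 := by omega
      simp [ht, h1, h2]

lemma outerA (F : Int → Int) (xs : List (Int × Int)) :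
    ∀ (t : Int) (r : PySem.Dict Int Int),
    (∀ p ∈ xs, r.contains p.1 = false) → (xs.map Prod.fst).Nodup →
    ((PySem.List.enumerate (xs.map Prod.fst) t).foldl
        (fun ret ik => ret.insert ik.2 (F ik.1)) r).items
      = r.items ++ (PySem.List.enumerate xs t).map (fun ik => (ik.2.1, F ik.1)) := by
  induction xs with
  | nil => intro t r _ _; simp
  | cons p xs ih =>
    intro t r hfresh hnd
    obtain ⟨k, v⟩ := p
    simp only [List.map_cons, PySem.List.enumerate_cons, List.foldl_cons, List.map_cons]
    rw [ih]
    · rw [PySem.Dict.items_insert_of_not_contains]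
      · simp
      · exact hfresh (k, v) (List.mem_cons_self ..)
    · intro q hq
      rw [PySem.Dict.contains_insert]
      have hq1 : q.1 ≠ k := by
        simp only [List.map_cons, List.nodup_cons] at hnd
        intro h; exact hnd.1 (h ▸ List.mem_map_of_mem hq)
      simp [hq1, hfresh q (List.mem_cons_of_mem _ hq)]
    · simp only [List.map_cons, List.nodup_cons] at hnd; exact hnd.2

lemma mapScan (xs : List (Int × Int)) : ∀ (t s : Int),
    (PySem.List.enumerate xs t).map
        (fun ik => (ik.2.1, s + ((xs.take ((ik.1 - t + 1).toNat)).map Prod.snd).sum))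
      = cdfScan s xs := by
  induction xs with
  | nil => intro t s; simp [cdfScan]
  | cons p xs ih =>
    intro t s
    obtain ⟨k, v⟩ := p
    simp only [PySem.List.enumerate_cons, List.map_cons, cdfScan]
    congr 1
    · simp
    · rw [← ih (t + 1) (s + v)]
      apply List.map_congr_left
      intro ik hik
      have ht := fst_ge_of_mem_enumerate hik
      have h1 : (ik.1 - t + 1).toNat = (ik.1 - (t + 1) + 1).toNat + 1 := by omega
      simp [h1, add_assoc]

theorem cdf_dict_spec : Claim_equal_cdf_dict := by
  intro data _ hpre
  unfold Spec_cdf_dict cdf_dict cdf_dict_alt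
  simp only []
  have hkeys : (PySem.Dict.mk data).keys = data.map Prod.fst := by
    simp [PySem.Dict.keys]
  have hnd : ((PySem.Dict.mk data).keys).Nodup := by rw [hkeys]; exact hpre
  have hlook : ∀ p ∈ data, (PySem.Dict.mk data).getD p.1 0 = p.2 := by
    intro p hp
    exact PySem.Dict.getD_of_mem_items (d := PySem.Dict.mk data) hp hnd 0
  rw [hkeys]
  have hout := outerA (fun i => (PySem.List.enumerate (List.map Prod.fst data)).foldl
      (fun s jk => if jk.1 ≤ i then s + (PySem.Dict.mk data).getD jk.2 0 else s) 0)
      data 0 PySem.Dict.empty (by simp) hpre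
  have hb := bFold data PySem.Dict.empty 0 (by simp) hpre
  have hmid : PySem.Dict.empty.items ++
      (PySem.List.enumerate data 0).map (fun ik => (ik.2.1,
        (PySem.List.enumerate (List.map Prod.fst data)).foldl
          (fun s jk => if jk.1 ≤ ik.1 then s + (PySem.Dict.mk data).getD jk.2 0 else s) 0)) =
      PySem.Dict.empty.items ++ cdfScan 0 data := by
    congr 1
    rw [← mapScan data 0 0]
    apply List.map_congr_left
    intro ik hik
    rw [innerA _ ik.1 data hlook 0 0]
  exact hout.trans (hmid.trans hb.symm)
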